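-- pv_equiv track=rewrite | github.com/AP-MI-2021/lab-3-emiliaimbrescu | main.py | get_prime_digits_for_one
-- ===== SOURCE A (Python) =====
-- def isprime(n: int) -> bool:
--     """
--     Se verifica daca un numar e prim.
--     :param n: int, numarul ce este verificat
--     :return: bool
--     """
--     if n > 1:
--         for i in range(2, int(n / 2) + 1):
--             if (n % i) == 0:
--                 return False
--         else:
--             return True
--
--     else:
--         return False
--
-- def get_prime_digits_for_one(a: int) -> bool:
--     """
--     Se verifica daca toate cifrele unui numar sunt prime.
--     :param a: int, numaru ale carui cifre sunt verificate
--     :return: bool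
--     """
--     b = a
--     c = 0
--     c1 = 0
--     while b > 0:
--         c1 += 1
--         n = b % 10
--         if isprime(n):
--             c += 1
--         b = b // 10
--     if c == c1:
--         return True
--     else:
--         return False
-- ===== SOURCE B (Python) =====
-- def get_prime_digits_for_one(a: int) -> bool:
--     b = a
--     while b > 0:
--         if b % 10 not in (2, 3, 5, 7):
--             return False
--         b //= 10
--     return True
-- ===== Notes on version B (the rewrite author's own statement) =====
-- stated objective: simpler
-- what changed: Replaces the two counters plus trial-division primality test of each digit with an early-exit loop that checks membership of each digit in the fixed set {2,3,5,7} (the only prime digits), returning False at the first non-prime digit.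
import Mathlib
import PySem

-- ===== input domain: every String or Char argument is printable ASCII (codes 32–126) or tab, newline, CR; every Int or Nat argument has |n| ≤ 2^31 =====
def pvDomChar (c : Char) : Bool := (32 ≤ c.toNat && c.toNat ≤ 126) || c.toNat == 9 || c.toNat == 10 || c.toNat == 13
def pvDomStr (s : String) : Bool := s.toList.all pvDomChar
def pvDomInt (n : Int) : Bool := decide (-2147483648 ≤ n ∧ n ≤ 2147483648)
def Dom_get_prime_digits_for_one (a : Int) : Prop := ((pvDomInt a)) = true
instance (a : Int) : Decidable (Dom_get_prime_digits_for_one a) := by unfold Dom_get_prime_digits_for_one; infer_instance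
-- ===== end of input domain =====

-- B drops A's two counters and per-digit trial division for an early-exit loop
-- testing each digit against the fixed prime-digit set {2,3,5,7}: simpler, same cost.

-- ===== PORT A =====
-- helper isprime of A, transliterated; int(n/2) = floor division since it is only
-- reached for n > 1 (positive), where float truncation equals flooring.
def pvIsprime (n : Int) : Bool :=
  if n > 1 then
    -- the for/else: True unless some i in range(2, int(n/2)+1) divides n
    (PySem.List.pyRange 2 (PySem.Int.floordiv n 2 + 1) 1).all
      (fun i => !(PySem.Int.mod n i == 0))
  else
    false

-- the while loop of A: state (b, c, c1), final test c == c1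
def pvGoA (b c c1 : Int) : Bool :=
  if b > 0 then
    pvGoA (PySem.Int.floordiv b 10)
      (if pvIsprime (PySem.Int.mod b 10) then c + 1 else c) (c1 + 1)
  else
    c == c1
termination_by b.toNat
decreasing_by
  rw [PySem.Int.floordiv_eq_ediv_of_pos (by norm_num : (0:Int) < 10)]
  omega

def get_prime_digits_for_one (a : Int) : Bool := pvGoA a 0 0

-- ===== PORT B =====
-- the while loop of B: early return False on the first digit not in (2, 3, 5, 7)
def pvGoB (b : Int) : Bool :=
  if b > 0 then
    if !(PySem.Int.mod b 10 == 2 || PySem.Int.mod b 10 == 3 ||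
         PySem.Int.mod b 10 == 5 || PySem.Int.mod b 10 == 7) then
      false
    else
      pvGoB (PySem.Int.floordiv b 10)
  else
    true
termination_by b.toNat
decreasing_by
  rw [PySem.Int.floordiv_eq_ediv_of_pos (by norm_num : (0:Int) < 10)]
  omega

def get_prime_digits_for_one_alt (a : Int) : Bool := pvGoB a

-- ===== PRECONDITION & SPEC =====
def Spec_get_prime_digits_for_one (a : Int) (out : Bool) : Prop := out = get_prime_digits_for_one_alt a
instance (a : Int) (out : Bool) : Decidable (Spec_get_prime_digits_for_one a out) := by unfold Spec_get_prime_digits_for_one; infer_instance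

-- ===== CLAIM (what is proved, stated in full; the proofs are below) =====
def Claim_equal_get_prime_digits_for_one : Prop := ∀ (a : Int), Dom_get_prime_digits_for_one a → Spec_get_prime_digits_for_one a (get_prime_digits_for_one a)

-- ===== LEMMAS AND PROOFS =====

-- a digit (0 ≤ d < 10) is prime exactly when it is 2, 3, 5 or 7
lemma pvIsprime_digit (d : Int) (h0 : 0 ≤ d) (h1 : d < 10) :
    pvIsprime d = (d == 2 || d == 3 || d == 5 || d == 7) := by
  interval_cases d <;> decide

lemma pvGoA_eq (n : Nat) : ∀ b c c1 : Int, b.toNat ≤ n → c ≤ c1 →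
    pvGoA b c c1 = ((c == c1) && pvGoB b) := by
  induction n with
  | zero =>
    intro b c c1 hb hc
    have hb' : ¬ b > 0 := by omega
    rw [pvGoA, pvGoB]
    simp [hb']
  | succ n ih =>
    intro b c c1 hb hc
    by_cases hpos : b > 0
    · have hdiv : PySem.Int.floordiv b 10 = b / 10 :=
        PySem.Int.floordiv_eq_ediv_of_pos (by norm_num)
      have hmod : PySem.Int.mod b 10 = b % 10 :=
        PySem.Int.mod_eq_emod_of_pos (by norm_num)
      have hlt : (PySem.Int.floordiv b 10).toNat ≤ n := by rw [hdiv]; omega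
      have hd0 : 0 ≤ PySem.Int.mod b 10 := by rw [hmod]; omega
      have hd1 : PySem.Int.mod b 10 < 10 := by rw [hmod]; omega
      rw [pvGoA, pvGoB]
      simp only [hpos, if_true]
      rw [pvIsprime_digit _ hd0 hd1]
      by_cases hp : (PySem.Int.mod b 10 == 2 || PySem.Int.mod b 10 == 3 ||
          PySem.Int.mod b 10 == 5 || PySem.Int.mod b 10 == 7) = true
      · simp only [hp, if_true, Bool.not_true, Bool.false_eq_true, if_false]
        rw [ih _ _ _ hlt (by omega)]
        have heq : ((c + 1 : Int) == c1 + 1) = (c == c1) := by simp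
        rw [heq]
      · simp only [Bool.not_eq_true] at hp
        simp only [hp, Bool.false_eq_true, if_false, Bool.not_false, if_true]
        rw [ih _ _ _ hlt (by omega)]
        have heq : ((c : Int) == c1 + 1) = false := by
          simp only [beq_eq_false_iff_ne]; omega
        simp [heq]
    · rw [pvGoA, pvGoB]
      simp [hpos]

-- ===== VERDICT (by name: the statement is the Claim_ definition above) =====
theorem get_prime_digits_for_one_spec : Claim_equal_get_prime_digits_for_one := by
  intro a _
  unfold Spec_get_prime_digits_for_one get_prime_digits_for_one get_prime_digits_for_one_alt
  rw [pvGoA_eq a.toNat a 0 0 le_rfl le_rfl]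
  simp
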